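-- pv_equiv track=rewrite | github.com/XueDugu/ttpkgUnpacker | ttpkgUnpacker/report.py | _path_groups
-- ===== SOURCE A (Python) =====
-- from collections import Counter
--
-- def _path_groups(unpacked_files):
--     counts = Counter()
--     for file_info in unpacked_files:
--         parts = file_info["name"].split("/")
--         if len(parts) == 1:
--             counts["<root>"] += 1
--         else:
--             counts[parts[0]] += 1
--     return dict(sorted(counts.items()))
-- ===== SOURCE B (Python) =====
-- def _top_key(name):
--     parts = name.split("/")
--     return parts[0] if len(parts) > 1 else "<root>"
--
--
-- def _path_groups(unpacked_files):
--     keys = sorted(_top_key(f["name"]) for f in unpacked_files)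
--     out = {}
--     i, n = 0, len(keys)
--     while i < n:
--         j = i
--         while j < n and keys[j] == keys[i]:
--             j += 1
--         out[keys[i]] = j - i
--         i = j
--     return out
-- ===== Notes on version B (the rewrite author's own statement) =====
-- stated objective: alternative
-- what changed: Replaces the Counter-hash-then-sort-items strategy by extracting every file's top-level key, sorting the whole key list, and counting contiguous runs with a two-index scan.
import Mathlib
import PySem

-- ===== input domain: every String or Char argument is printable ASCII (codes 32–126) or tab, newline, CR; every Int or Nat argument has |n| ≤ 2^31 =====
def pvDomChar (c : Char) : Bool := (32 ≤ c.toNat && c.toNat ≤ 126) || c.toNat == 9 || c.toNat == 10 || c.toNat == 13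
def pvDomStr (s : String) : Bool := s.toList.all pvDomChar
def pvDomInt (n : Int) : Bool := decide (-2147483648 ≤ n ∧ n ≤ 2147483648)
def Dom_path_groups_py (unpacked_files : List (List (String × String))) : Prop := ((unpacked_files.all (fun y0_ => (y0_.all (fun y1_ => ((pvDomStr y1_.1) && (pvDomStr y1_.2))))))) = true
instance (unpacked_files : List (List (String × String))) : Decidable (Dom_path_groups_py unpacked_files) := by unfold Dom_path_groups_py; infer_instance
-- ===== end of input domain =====

-- B replaces A's Counter-then-sort-items strategy by sorting the extracted top-level keys and counting contiguous runs (alternative decomposition, similar cost).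


-- ===== PORT A =====
def path_groups_py (unpacked_files : List (List (String × String))) : List (String × Int) :=
  let counts := unpacked_files.foldl (fun counts file_info =>
      -- file_info["name"]: Pre_ guarantees the key is present, so the .getD "" default is never taken
      let name := ((PySem.Dict.mk file_info).get? "name").getD ""
      -- name.split("/"): the separator "/" is nonempty, so split? is always some
      let parts := (PySem.Str.split? name "/").getD []
      if parts.length == 1 then counts.modify "<root>" 0 (· + 1)
      -- parts[0]: split never returns an empty list, so the .getD "" default is never taken
      else counts.modify ((PySem.List.pyGet? parts 0).getD "") 0 (· + 1))
    PySem.Dict.empty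
  PySem.List.sorted2 counts.items (fun p => p.1) (fun p => p.2)

-- ===== PORT B =====
def pvTopKey (name : String) : String :=
  -- the separator "/" is nonempty, so split? is always some
  let parts := (PySem.Str.split? name "/").getD []
  -- parts[0]: split never returns an empty list, so the .getD "" default is never taken
  if 1 < parts.length then (PySem.List.pyGet? parts 0).getD "" else "<root>"

-- the inner while loop of Source B: count one contiguous run, emit it, continue after it
def pvRuns : List String → List (String × Int)
  | [] => []
  | k :: rest =>
      (k, ((rest.takeWhile (fun x => x == k)).length : Int) + 1) :: pvRuns (rest.dropWhile (fun x => x == k))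
termination_by l => l.length
decreasing_by simpa using Nat.lt_succ_of_le (List.length_dropWhile_le _ _)

def path_groups_py_alt (unpacked_files : List (List (String × String))) : List (String × Int) :=
  let keys := PySem.List.sorted
    (unpacked_files.map (fun f => pvTopKey (((PySem.Dict.mk f).get? "name").getD "")))
    (fun x => x)
  pvRuns keys

-- ===== PRECONDITION & SPEC =====
-- Pre_ excludes exactly the inputs on which A raises KeyError: some file_info without a "name" key.
def Pre_path_groups_py (unpacked_files : List (List (String × String))) : Prop :=
  ∀ fi ∈ unpacked_files, "name" ∈ fi.map Prod.fst
instance (unpacked_files : List (List (String × String))) : Decidable (Pre_path_groups_py unpacked_files) := by unfold Pre_path_groups_py; infer_instance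
def pvWitness_path_groups_py : (List (List (String × String))) :=
  [[("name", "pkg/a.txt")], [("name", "readme")], [("name", "pkg/b.txt")]]
def Spec_path_groups_py (unpacked_files : List (List (String × String))) (out : List (String × Int)) : Prop := out = path_groups_py_alt unpacked_files
instance (unpacked_files : List (List (String × String))) (out : List (String × Int)) : Decidable (Spec_path_groups_py unpacked_files out) := by unfold Spec_path_groups_py; infer_instance

-- ===== CLAIM (what is proved, stated in full; the proofs are below) =====
def Claim_equal_path_groups_py : Prop := ∀ (unpacked_files : List (List (String × String))), Dom_path_groups_py unpacked_files → Pre_path_groups_py unpacked_files → Spec_path_groups_py unpacked_files (path_groups_py unpacked_files)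

-- ===== LEMMAS AND PROOFS =====

-- split("/") never yields the empty list
theorem pv_go_ne_nil (sep : List Char) (fuel : Nat) (l cur : List Char) (acc : List (List Char)) :
    PySem.Chars.splitOn.go sep fuel l cur acc ≠ [] := by
  induction fuel generalizing l cur acc with
  | zero => simp [PySem.Chars.splitOn.go]
  | succ n ih =>
    cases l with
    | nil => simp [PySem.Chars.splitOn.go]
    | cons c rest =>
      rw [PySem.Chars.splitOn.go]
      split
      · exact ih _ _ _
      · exact ih _ _ _

theorem pv_split_ne_nil (s : String) : (PySem.Str.split? s "/").getD [] ≠ [] := by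
  simp [PySem.Str.split?, PySem.Chars.split?, PySem.Chars.splitOn]
  exact pv_go_ne_nil _ _ _ _ _

-- insertBy only looks at comparisons of the inserted element with list members
theorem pv_insertBy_congr {α : Type} (f g : α → α → Bool) (x : α) (ys : List α)
    (h : ∀ b ∈ ys, f x b = g x b) : PySem.List.insertBy f x ys = PySem.List.insertBy g x ys := by
  induction ys with
  | nil => rfl
  | cons y ys ih =>
    rw [PySem.List.insertBy, PySem.List.insertBy, h y (by simp)]
    split
    · rfl
    · rw [ih (fun b hb => h b (by simp [hb]))]

theorem pv_foldl_insertBy_congr {α : Type} (f g : α → α → Bool) (S : List α)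
    (h : ∀ a ∈ S, ∀ b ∈ S, f a b = g a b) :
    ∀ (xs acc : List α), xs ⊆ S → acc ⊆ S →
      xs.foldl (fun acc x => PySem.List.insertBy f x acc) acc
        = xs.foldl (fun acc x => PySem.List.insertBy g x acc) acc := by
  intro xs
  induction xs with
  | nil => intro acc _ _; rfl
  | cons x xs ih =>
    intro acc hxs hacc
    have hxS : x ∈ S := hxs (by simp)
    have h1 : PySem.List.insertBy f x acc = PySem.List.insertBy g x acc :=
      pv_insertBy_congr f g x acc (fun b hb => h x hxS b (hacc hb))
    simp only [List.foldl_cons, h1]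
    exact ih _ (fun a ha => hxs (by simp [ha])) (fun a ha => by
      rcases (PySem.List.mem_insertBy g x a acc).mp ha with rfl | ha
      · exact hxS
      · exact hacc ha)

-- with pairwise-distinct first components, Python's tuple sort is a sort by the first component
theorem pv_sorted2_eq_sorted_fst (xs : List (String × Int)) (h : (xs.map Prod.fst).Nodup) :
    PySem.List.sorted2 xs (fun p => p.1) (fun p => p.2) = PySem.List.sorted xs (fun p => p.1) := by
  rw [PySem.List.sorted_eq_foldl_insertBy]
  show xs.foldl (fun acc x => PySem.List.insertBy
      (fun a b => decide (a.1 < b.1) || (!decide (b.1 < a.1) && decide (a.2 < b.2))) x acc) []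
    = _
  apply pv_foldl_insertBy_congr _ _ xs _ xs [] (fun a ha => ha) (by simp)
  intro a ha b hb
  by_cases hab : a = b
  · subst hab; simp
  · have hne : a.1 ≠ b.1 := fun hfst => hab (List.inj_on_of_nodup_map h ha hb hfst)
    rcases lt_trichotomy a.1 b.1 with hlt | heq | hgt
    · simp [hlt, not_lt_of_gt hlt]
    · exact absurd heq hne
    · simp [hgt, not_lt_of_gt hgt]

theorem pv_ofList_sublist {α : Type} [BEq α] [LawfulBEq α] (xs : List α) :
    (PySem.Set.ofList xs).Sublist xs := by
  induction xs with
  | nil => simp [PySem.Set.ofList]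
  | cons x xs ih =>
    rw [PySem.Set.ofList_cons]
    exact (List.Sublist.trans List.filter_sublist ih).cons₂ x

-- k does not occur after its run in a sorted list
theorem pv_not_mem_dropWhile (k : String) (rest : List String) (h : (k :: rest).Pairwise (· ≤ ·)) :
    k ∉ rest.dropWhile (fun x => x == k) := by
  intro hk
  set d := rest.dropWhile (fun x => x == k) with hd
  cases hdc : d with
  | nil => rw [hdc] at hk; exact absurd hk (by simp)
  | cons h0 d' =>
    have hhead : (h0 == k) = false := by
      have := List.head?_dropWhile_not (p := fun x => x == k) (l := rest)
      rw [← hd, hdc] at this; simpa using this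
    have hne : h0 ≠ k := by simpa using hhead
    have hmem : ∀ x ∈ rest, k ≤ x := by
      intro x hx; exact (List.pairwise_cons.mp h).1 x hx
    have hdsub : d.Sublist rest := hd ▸ List.dropWhile_sublist _
    have hdp : d.Pairwise (· ≤ ·) := ((List.pairwise_cons.mp h).2).sublist hdsub
    rw [hdc] at hk
    rcases List.mem_cons.mp hk with rfl | hk'
    · exact hne rfl
    · have h1 : h0 ≤ k := (List.pairwise_cons.mp (hdc ▸ hdp)).1 k hk'
      have h2 : k ≤ h0 := hmem h0 (hdsub.mem (by rw [hdc]; simp))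
      exact hne (le_antisymm h1 h2)

-- dropping a run of k's in front of a k-free tail drops nothing else
theorem pv_discard_ofList (k : String) (t d : List String)
    (htk : ∀ x ∈ t, x = k) (hkd : k ∉ d) :
    (PySem.Set.ofList (t ++ d)).discard k = PySem.Set.ofList d := by
  induction t with
  | nil =>
    simp only [List.nil_append, PySem.Set.discard]
    refine List.filter_eq_self.mpr ?_
    intro x hx
    have hxd : x ∈ d := (PySem.Set.mem_ofList d x).mp hx
    simp only [Bool.not_eq_eq_eq_not, Bool.not_true, beq_eq_false_iff_ne]
    rintro rfl; exact hkd hxd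
  | cons x t iht =>
    have hxk : x = k := htk x (by simp)
    subst hxk
    rw [List.cons_append, PySem.Set.ofList_cons]
    simp only [PySem.Set.discard]
    rw [List.filter_cons_of_neg (by simp), List.filter_filter]
    simp only [Bool.and_self]
    exact iht (fun y hy => htk y (by simp [hy]))

-- run-counting a sorted list yields each distinct key (first occurrences) with its multiplicity
theorem pv_pvRuns_eq (l : List String) (h : l.Pairwise (· ≤ ·)) :
    pvRuns l = (PySem.Set.ofList l).map (fun k => (k, (l.count k : Int))) := by
  induction l using pvRuns.induct with
  | case1 => simp [pvRuns, PySem.Set.ofList]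
  | case2 k rest ih =>
    have hrest : rest.Pairwise (· ≤ ·) := (List.pairwise_cons.mp h).2
    set t := rest.takeWhile (fun x => x == k) with ht
    set d := rest.dropWhile (fun x => x == k) with hd
    have hkd : k ∉ d := pv_not_mem_dropWhile k rest h
    have htk : ∀ x ∈ t, x = k := by
      intro x hx
      have := List.mem_takeWhile_imp hx
      simpa using this
    have hrestsplit : t ++ d = rest := by rw [ht, hd]; exact List.takeWhile_append_dropWhile
    have hdp : d.Pairwise (· ≤ ·) := hrest.sublist (hd ▸ List.dropWhile_sublist _)
    have hcountk : (k :: rest).count k = t.length + 1 := by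
      rw [← hrestsplit, List.count_cons]
      have h1 : t.count k = t.length := List.count_eq_length.mpr (fun b hb => by rw [htk b hb])
      have h2 : d.count k = 0 := List.count_eq_zero.mpr hkd
      simp [List.count_append, h1, h2, Nat.add_comm]
    have hofl : PySem.Set.ofList (k :: rest) = k :: PySem.Set.ofList d := by
      rw [PySem.Set.ofList_cons, ← hrestsplit]
      rw [pv_discard_ofList k t d htk hkd]
    rw [pvRuns, hofl]
    simp only [List.map_cons]
    congr 1
    · simp only [← ht, hcountk]; push_cast; ring_nf
    · rw [ih hdp]
      apply List.map_congr_left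
      intro x hx
      have hxd : x ∈ d := (PySem.Set.mem_ofList d x).mp hx
      have hxk : x ≠ k := by rintro rfl; exact hkd hxd
      congr 1
      rw [← hrestsplit, List.count_cons]
      have h1 : t.count x = 0 := List.count_eq_zero.mpr (fun hxt => hxk (htk x hxt))
      simp [List.count_append, h1, Ne.symm hxk]

-- ===== VERDICT (by name: the statement is the Claim_ definition above) =====
theorem path_groups_py_spec : Claim_equal_path_groups_py := by
  intro ufs _ _
  unfold Spec_path_groups_py path_groups_py path_groups_py_alt
  simp only []
  -- the shared key function
  set keyf : List (String × String) → String :=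
    fun f => pvTopKey (((PySem.Dict.mk f).get? "name").getD "") with hkeyf
  set keys : List String := ufs.map keyf with hkeys
  -- A's fold is Counter(keys)
  have hbody : (fun (counts : PySem.Dict String Int) file_info =>
      let name := ((PySem.Dict.mk file_info).get? "name").getD ""
      let parts := (PySem.Str.split? name "/").getD []
      if parts.length == 1 then counts.modify "<root>" 0 (· + 1)
      else counts.modify ((PySem.List.pyGet? parts 0).getD "") 0 (· + 1))
      = (fun counts file_info => counts.modify (keyf file_info) 0 (· + 1)) := by
    funext counts file_info
    rw [hkeyf]
    simp only []
    set name := ((PySem.Dict.mk file_info).get? "name").getD "" with hname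
    have hne := pv_split_ne_nil name
    unfold pvTopKey
    cases hparts : (PySem.Str.split? name "/").getD [] with
    | nil => exact absurd hparts hne
    | cons p ps =>
      cases ps with
      | nil => simp
      | cons q qs => simp [PySem.List.pyGet?_zero_cons]
  rw [hbody]
  have hcounter : ufs.foldl (fun counts file_info => counts.modify (keyf file_info) 0 (· + 1))
      PySem.Dict.empty = PySem.Dict.counter keys := by
    rw [PySem.Dict.counter_eq_foldl, hkeys, List.foldl_map]
  rw [hcounter, PySem.Dict.items_counter]
  -- B's side: sorted keys, run-counted
  set s : List String := PySem.List.sorted keys (fun x => x) with hs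
  have hsp : s.Pairwise (· ≤ ·) := PySem.List.sorted_pairwise keys (fun x => x)
  have hsperm : s.Perm keys := PySem.List.sorted_perm keys (fun x => x) false
  have hruns : pvRuns s = (PySem.Set.ofList s).map (fun k => (k, (keys.count k : Int))) := by
    rw [pv_pvRuns_eq s hsp]
    exact List.map_congr_left (fun x _ => by rw [hsperm.count_eq])
  -- A's sorted2 is a sort by first component (keys are distinct)
  have hnodupfst : (((PySem.Set.ofList keys).map (fun k => (k, (keys.count k : Int)))).map Prod.fst).Nodup := by
    rw [List.map_map]
    have hid : (Prod.fst ∘ fun k => (k, (keys.count k : Int))) = id := rfl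
    rw [hid, List.map_id]
    exact PySem.Set.nodup_ofList keys
  rw [pv_sorted2_eq_sorted_fst _ hnodupfst]
  -- name the sorted order: B's list is the strictly-increasing rearrangement of A's items
  rw [hruns]
  apply PySem.List.sorted_eq_of_perm_of_pairwise_lt
  · apply List.Perm.map
    refine (List.perm_ext_iff_of_nodup (PySem.Set.nodup_ofList s) (PySem.Set.nodup_ofList keys)).mpr ?_
    intro a
    rw [PySem.Set.mem_ofList, PySem.Set.mem_ofList, hsperm.mem_iff]
  · rw [List.pairwise_map]
    have hlt : (PySem.Set.ofList s).Pairwise (· < ·) := by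
      have hle : (PySem.Set.ofList s).Pairwise (· ≤ ·) := hsp.sublist (pv_ofList_sublist s)
      have hne : (PySem.Set.ofList s).Pairwise (· ≠ ·) := PySem.Set.nodup_ofList s
      exact (hle.and hne).imp (fun hab => lt_of_le_of_ne hab.1 hab.2)
    exact hlt
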